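-- pv_equiv track=rewrite | github.com/Geanderson-Ferreira/danfe-maker | utils.py | extrair_serie_nf
-- ===== SOURCE A (Python) =====
-- def extrair_serie_nf(texto):
--     serie = None
--     nf = None
--
--     # Percorrer cada caractere da string
--     i = 0
--     while i < len(texto):
--         # Se encontrar "Serie:", capture o valor após
--         if texto[i:i+6] == "Serie:":
--             i += 6  # Pular a palavra "Serie:"
--             valor_serie = ""
--             while i < len(texto) and texto[i].isdigit():  # Captura até o primeiro espaço
--                 valor_serie += texto[i]
--                 i += 1
--             serie = valor_serie.strip()
--
--         # Se encontrar "NF:", capture o valor após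
--         elif texto[i:i+3] == "NF:":
--             i += 3  # Pular a palavra "NF:"
--             valor_nf = ""
--             while i < len(texto) and texto[i].isdigit():  # Captura até o primeiro espaço
--                 valor_nf += texto[i]
--                 i += 1
--             nf = valor_nf.strip()
--
--         else:
--             i += 1  # Avança para o próximo caractere
--
--     return {"serie":serie, "nf": nf}
-- ===== SOURCE B (Python) =====
-- def extrair_serie_nf(texto):
--     def cap(key):
--         idx = texto.rfind(key)
--         if idx == -1:
--             return None
--         j = idx + len(key)
--         out = ""
--         while j < len(texto) and texto[j].isdigit():
--             out += texto[j]
--             j += 1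
--         return out
--     return {"serie": cap("Serie:"), "nf": cap("NF:")}
-- ===== Notes on version B (the rewrite author's own statement) =====
-- stated objective: simpler
-- what changed: Replaces the single interleaved left-to-right state-machine scan with an independent helper per keyword: rfind locates the rightmost occurrence, then one forward digit read; valid because neither keyword can start inside a keyword match or a digit run.
import Mathlib
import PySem

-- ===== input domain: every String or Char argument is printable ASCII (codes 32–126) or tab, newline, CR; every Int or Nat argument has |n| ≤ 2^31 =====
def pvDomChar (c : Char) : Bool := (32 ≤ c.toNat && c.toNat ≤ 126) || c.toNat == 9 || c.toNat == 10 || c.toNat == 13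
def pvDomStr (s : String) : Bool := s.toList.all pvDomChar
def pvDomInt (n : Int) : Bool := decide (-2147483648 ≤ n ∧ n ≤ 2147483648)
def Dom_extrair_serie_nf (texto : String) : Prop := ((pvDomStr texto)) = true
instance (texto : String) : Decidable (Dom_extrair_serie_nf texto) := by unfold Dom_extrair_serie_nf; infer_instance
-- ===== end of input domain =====

-- B replaces A's single interleaved scan by one independent rfind-then-read-digits pass per keyword (simpler decomposition).


-- ===== PORT A =====
-- A's inner `while` loop: accumulate digit characters, return the digits and the remaining suffix.
def pvInner (acc : List Char) : List Char → (List Char × List Char)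
  | [] => (acc, [])
  | c :: t => if PySem.Chars.isdigit c then pvInner (acc ++ [c]) t else (acc, c :: t)

theorem pvInner_snd_length (acc : List Char) (l : List Char) : (pvInner acc l).2.length ≤ l.length := by
  induction l generalizing acc with
  | nil => simp [pvInner]
  | cons c t ih =>
    simp only [pvInner]
    split
    · exact Nat.le_trans (ih _) (by simp)
    · simp

-- A's outer `while` loop over the suffix `rest = texto[i:]`; `texto[i:i+k] == key` becomes `rest.take k = key`.
def pvLoopA (rest : List Char) (serie nf : Option String) : List (String × Option String) :=
  match h : rest with
  | [] => [("serie", serie), ("nf", nf)]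
  | _ :: t =>
    if h6 : rest.take 6 = "Serie:".toList then
      let p := pvInner [] (rest.drop 6)
      pvLoopA p.2 (some (String.ofList (PySem.Chars.strip p.1))) nf
    else if h3 : rest.take 3 = "NF:".toList then
      let p := pvInner [] (rest.drop 3)
      pvLoopA p.2 serie (some (String.ofList (PySem.Chars.strip p.1)))
    else
      pvLoopA t serie nf
termination_by rest.length
decreasing_by
  · have h1 : (rest.take 6).length = 6 := by rw [h6]; decide
    have hl : rest.length = t.length + 1 := by rw [h]; simp
    have := pvInner_snd_length [] (rest.drop 6)
    simp only [List.length_take] at h1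
    simp only [List.length_drop] at this
    simp only [List.length_cons]
    omega
  · have h1 : (rest.take 3).length = 3 := by rw [h3]; decide
    have hl : rest.length = t.length + 1 := by rw [h]; simp
    have := pvInner_snd_length [] (rest.drop 3)
    simp only [List.length_take] at h1
    simp only [List.length_drop] at this
    simp only [List.length_cons]
    omega
  · simp [h]

def extrair_serie_nf (texto : String) : List (String × Option String) :=
  pvLoopA texto.toList none none

-- ===== PORT B =====
-- Source B's `while j < len and texto[j].isdigit()` forward read, over the suffix starting at j.
def pvCapDigits : List Char → List Char
  | [] => []
  | c :: t => if PySem.Chars.isdigit c then c :: pvCapDigits t else []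

-- Source B's helper cap(key)
def pvCap (texto : String) (key : String) : Option String :=
  let idx := PySem.Str.rfind texto key
  if idx = -1 then none
  else some (String.ofList (pvCapDigits (texto.toList.drop (idx.toNat + (PySem.Str.len key).toNat))))

def extrair_serie_nf_alt (texto : String) : List (String × Option String) :=
  [("serie", pvCap texto "Serie:"), ("nf", pvCap texto "NF:")]

-- ===== PRECONDITION & SPEC =====
def Spec_extrair_serie_nf (texto : String) (out : List (String × Option String)) : Prop := out = extrair_serie_nf_alt texto
instance (texto : String) (out : List (String × Option String)) : Decidable (Spec_extrair_serie_nf texto out) := by unfold Spec_extrair_serie_nf; infer_instance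

-- ===== CLAIM (what is proved, stated in full; the proofs are below) =====
def Claim_equal_extrair_serie_nf : Prop := ∀ (texto : String), Dom_extrair_serie_nf texto → Spec_extrair_serie_nf texto (extrair_serie_nf texto)

-- ===== LEMMAS AND PROOFS =====

-- B's cap, stated over char lists (proof-side mirror of pvCap).
def capC (key cs : List Char) : Option (List Char) :=
  if PySem.Chars.rfind cs key = -1 then none
  else some (pvCapDigits (cs.drop ((PySem.Chars.rfind cs key).toNat + key.length)))

-- combine a fresh capture with the value carried so far (the last keyword match wins)
def ov (o : Option (List Char)) (d : Option String) : Option String :=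
  o.elim d (fun v => some (String.ofList v))

theorem pvCap_eq (texto key : String) : pvCap texto key = (capC key.toList texto.toList).map String.ofList := by
  simp only [pvCap, capC, PySem.Str.rfind_eq, PySem.Str.len_eq, Int.toNat_natCast]
  split <;> simp

theorem pvCapDigits_eq (l : List Char) : pvCapDigits l = l.takeWhile PySem.Chars.isdigit := by
  induction l with
  | nil => rfl
  | cons c t ih => simp only [pvCapDigits, List.takeWhile_cons, ih]

theorem pvInner_eq (acc l : List Char) :
    pvInner acc l = (acc ++ l.takeWhile PySem.Chars.isdigit, l.dropWhile PySem.Chars.isdigit) := by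
  induction l generalizing acc with
  | nil => simp [pvInner]
  | cons c t ih =>
    simp only [pvInner, List.takeWhile_cons, List.dropWhile_cons]
    split <;> simp_all

theorem isdigit_not_space (c : Char) (h : PySem.Chars.isdigit c = true) : PySem.Chars.isspace c = false := by
  simp only [PySem.Chars.isdigit, Bool.and_eq_true, decide_eq_true_eq, Char.le_def] at h
  simp only [PySem.Chars.isspace, Char.toNat]
  have h0 : ('0' : Char).val.toNat = 48 := by decide
  have h9 : ('9' : Char).val.toNat = 57 := by decide
  obtain ⟨h1, h2⟩ := h
  rw [UInt32.le_iff_toNat_le] at h1 h2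
  simp only [h0] at h1; simp only [h9] at h2
  simp only [Bool.or_eq_false_iff, Bool.and_eq_false_iff, decide_eq_false_iff_not]
  omega

theorem dropWhile_isspace_of_digits (l : List Char) (h : ∀ c ∈ l, PySem.Chars.isdigit c = true) :
    List.dropWhile PySem.Chars.isspace l = l := by
  cases l with
  | nil => rfl
  | cons c t =>
    rw [List.dropWhile_cons_of_neg]
    simp [isdigit_not_space c (h c (by simp))]

theorem strip_digits (l : List Char) (h : ∀ c ∈ l, PySem.Chars.isdigit c = true) :
    PySem.Chars.strip l = l := by
  unfold PySem.Chars.strip PySem.Chars.lstrip PySem.Chars.rstrip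
  rw [dropWhile_isspace_of_digits l h, dropWhile_isspace_of_digits l.reverse (by simpa using h), List.reverse_reverse]

-- rfind.go computes the largest admissible occurrence index ≤ j (or -1)
theorem go_cases (s sub : List Char) (j : Nat) :
    (PySem.Chars.rfind.go s sub j = -1 ∧ ∀ i ≤ j, ¬ sub <+: s.drop i) ∨
    (∃ k : Nat, k ≤ j ∧ PySem.Chars.rfind.go s sub j = (k : Int) ∧ sub <+: s.drop k ∧
      ∀ i, k < i → i ≤ j → ¬ sub <+: s.drop i) := by
  induction j with
  | zero =>
    by_cases h : sub.isPrefixOf s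
    · right
      exact ⟨0, le_refl 0, by simp [PySem.Chars.rfind.go, h], by simpa using List.isPrefixOf_iff_prefix.mp h, by intro i h1 h2; exact absurd (h1.trans_le h2) (lt_irrefl 0)⟩
    · left
      refine ⟨by simp [PySem.Chars.rfind.go, h], ?_⟩
      intro i hi
      interval_cases i
      simpa using fun hp => h (List.isPrefixOf_iff_prefix.mpr hp)
  | succ j ih =>
    have hgo : PySem.Chars.rfind.go s sub (j+1) =
        if sub.isPrefixOf (s.drop (j+1)) then ((j+1 : Nat) : Int) else PySem.Chars.rfind.go s sub j := rfl
    by_cases h : sub.isPrefixOf (s.drop (j+1))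
    · right
      refine ⟨j+1, le_refl _, by simp [hgo, h], List.isPrefixOf_iff_prefix.mp h, ?_⟩
      intro i h1 h2; omega
    · rcases ih with ⟨h1, h2⟩ | ⟨k, hk, h1, h2, h3⟩
      · left
        refine ⟨by simp [hgo, h, h1], ?_⟩
        intro i hi
        rcases Nat.lt_or_ge i (j+1) with hlt | hge
        · exact h2 i (by omega)
        · have : i = j + 1 := by omega
          subst this
          exact fun hp => h (List.isPrefixOf_iff_prefix.mpr hp)
      · right
        refine ⟨k, by omega, by simp [hgo, h, h1], h2, ?_⟩
        intro i hki hij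
        rcases Nat.lt_or_ge i (j+1) with hlt | hge
        · exact h3 i hki (by omega)
        · have : i = j + 1 := by omega
          subst this
          exact fun hp => h (List.isPrefixOf_iff_prefix.mpr hp)

theorem not_prefix_of_big (s sub : List Char) (hsub : sub ≠ []) (i : Nat) (hi : s.length < i) :
    ¬ sub <+: s.drop i := by
  rw [List.drop_eq_nil_of_le (by omega)]
  simpa [List.prefix_nil] using hsub

theorem rfind_cases (s sub : List Char) (hsub : sub ≠ []) :
    (PySem.Chars.rfind s sub = -1 ∧ ∀ i, ¬ sub <+: s.drop i) ∨
    (∃ k : Nat, PySem.Chars.rfind s sub = (k : Int) ∧ sub <+: s.drop k ∧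
      ∀ i, k < i → ¬ sub <+: s.drop i) := by
  rcases go_cases s sub s.length with ⟨h1, h2⟩ | ⟨k, hk, h1, h2, h3⟩
  · left
    refine ⟨h1, fun i => ?_⟩
    rcases Nat.lt_or_ge s.length i with hlt | hge
    · exact not_prefix_of_big s sub hsub i hlt
    · exact h2 i hge
  · right
    refine ⟨k, h1, h2, fun i hki => ?_⟩
    rcases Nat.lt_or_ge s.length i with hlt | hge
    · exact not_prefix_of_big s sub hsub i hlt
    · exact h3 i hki hge

theorem rfind_eq_of (s sub : List Char) (k : Nat) (hk : sub <+: s.drop k)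
    (hmax : ∀ i, k < i → ¬ sub <+: s.drop i) : PySem.Chars.rfind s sub = (k : Int) := by
  have hsub : sub ≠ [] := by
    intro h; subst h
    exact hmax (k+1) (by omega) (List.nil_prefix)
  rcases rfind_cases s sub hsub with ⟨_, h2⟩ | ⟨k', h1, h2, h3⟩
  · exact absurd hk (h2 k)
  · rcases Nat.lt_trichotomy k k' with h | h | h
    · exact absurd h2 (hmax k' h)
    · subst h; exact h1
    · exact absurd hk (h3 k h)

theorem rfind_eq_neg_one (s sub : List Char) (hsub : sub ≠ [])
    (h : ∀ i, ¬ sub <+: s.drop i) : PySem.Chars.rfind s sub = -1 := by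
  rcases rfind_cases s sub hsub with ⟨h1, _⟩ | ⟨k, _, h2, _⟩
  · exact h1
  · exact absurd h2 (h k)

theorem not_prefix_of_head? (K x : List Char) (c : Char) (hK : K ≠ [])
    (hx : x.head? = some c) (hc : K.head? ≠ some c) : ¬ K <+: x := by
  intro h
  rcases h with ⟨t, rfl⟩
  cases K with
  | nil => exact hK rfl
  | cons a l => simp only [List.cons_append, List.head?_cons] at hx hc; exact hc (hx ▸ rfl)

-- no occurrence of the key inside the tail part of an append
theorem capC_append_no (key pre rest' : List Char) (hkey : key ≠ [])
    (hno : ∀ i, i < pre.length → ¬ key <+: ((pre ++ rest').drop i)) :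
    capC key (pre ++ rest') = capC key rest' := by
  have hdrop : ∀ i : Nat, pre.length ≤ i → (pre ++ rest').drop i = rest'.drop (i - pre.length) := by
    intro i hi
    rw [List.drop_append, List.drop_eq_nil_of_le hi, List.nil_append]
  rcases rfind_cases rest' key hkey with ⟨h1, h2⟩ | ⟨k, h1, h2, h3⟩
  · have hA : PySem.Chars.rfind (pre ++ rest') key = -1 := by
      apply rfind_eq_neg_one _ _ hkey
      intro i
      rcases Nat.lt_or_ge i pre.length with hlt | hge
      · exact hno i hlt
      · rw [hdrop i hge]; exact h2 _
    simp [capC, hA, h1]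
  · have hA : PySem.Chars.rfind (pre ++ rest') key = ((pre.length + k : Nat) : Int) := by
      apply rfind_eq_of
      · rw [hdrop _ (by omega)]
        simpa using h2
      · intro i hi
        have hge : pre.length ≤ i := by omega
        rw [hdrop i hge]
        exact h3 _ (by omega)
    have hne : ¬ (((pre.length + k : Nat) : Int) = -1) := by omega
    have hne' : ¬ (((k : Nat) : Int) = -1) := by omega
    rw [capC, capC, hA, h1, if_neg hne, if_neg hne', Int.toNat_natCast, Int.toNat_natCast]
    have hd2 := hdrop (pre.length + k + key.length) (by omega)
    have hidx : pre.length + k + key.length - pre.length = k + key.length := by omega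
    rw [hd2, hidx]

-- the key occurs at the head of `pre` and nowhere later
theorem capC_append_hit (key pre rest' : List Char) (hkey : key ≠ [])
    (hpre : key <+: pre)
    (hno : ∀ i, 0 < i → i < pre.length → ¬ key <+: ((pre ++ rest').drop i))
    (hmiss : ∀ i, ¬ key <+: rest'.drop i) :
    capC key (pre ++ rest') = some (pvCapDigits (pre.drop key.length ++ rest')) := by
  have hdrop : ∀ i : Nat, pre.length ≤ i → (pre ++ rest').drop i = rest'.drop (i - pre.length) := by
    intro i hi
    rw [List.drop_append, List.drop_eq_nil_of_le hi, List.nil_append]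
  have hA : PySem.Chars.rfind (pre ++ rest') key = ((0 : Nat) : Int) := by
    apply rfind_eq_of
    · simpa using hpre.trans (List.prefix_append pre rest')
    · intro i hi
      rcases Nat.lt_or_ge i pre.length with hlt | hge
      · exact hno i (by omega) hlt
      · rw [hdrop i hge]; exact hmiss _
  have hlen : key.length ≤ pre.length := hpre.length_le
  simp only [capC, hA]
  norm_num
  rw [List.drop_append_of_le_length hlen]

theorem isdigit_head_not_key (K : List Char) (x : List Char) (c : Char)
    (hK : K.head? = some 'S' ∨ K.head? = some 'N')
    (hx : x.head? = some c) (hc : PySem.Chars.isdigit c = true) : ¬ K <+: x := by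
  apply not_prefix_of_head? K x c
  · rintro rfl; simp at hK
  · exact hx
  · rcases hK with h | h <;> rw [h] <;> intro he <;> rw [Option.some_inj] at he <;> subst he <;> revert hc <;> decide

-- the per-branch "no internal occurrence" facts for pre = key' ++ d (d the captured digits)
theorem no_occ_in_pre (key' d rest' K : List Char)
    (hK : K.head? = some 'S' ∨ K.head? = some 'N')
    (hKne : K ≠ [])
    (hd : ∀ c ∈ d, PySem.Chars.isdigit c = true)
    (hKonly : ∀ i, i < key'.length → 0 < i → K.head? ≠ key'[i]?) :
    ∀ i, 0 < i → i < (key' ++ d).length → ¬ K <+: (((key' ++ d) ++ rest').drop i) := by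
  intro i h0 hlen
  rw [List.append_assoc]
  have hx : ((key' ++ (d ++ rest')).drop i).head? = (key' ++ (d ++ rest'))[i]? := List.head?_drop
  rcases Nat.lt_or_ge i key'.length with hlt | hge
  · apply not_prefix_of_head? K _ key'[i] hKne
    · rw [hx, List.getElem?_append_left hlt]
      exact List.getElem?_eq_getElem hlt
    · have := hKonly i hlt h0
      rwa [← List.getElem?_eq_getElem hlt]
  · have hm : i - key'.length < d.length := by
      simp only [List.length_append] at hlen
      omega
    apply isdigit_head_not_key K _ d[i - key'.length] hK
    · rw [hx, List.getElem?_append_right hge, List.getElem?_append_left hm]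
      exact List.getElem?_eq_getElem hm
    · exact hd _ (List.getElem_mem hm)

-- capC of the empty string is none (the keywords are nonempty)
theorem capC_nil (K : List Char) (hK : K ≠ []) : capC K [] = none := by
  have : PySem.Chars.rfind [] K = -1 := by
    apply rfind_eq_neg_one _ _ hK
    intro i
    simpa [List.prefix_nil] using hK
  simp [capC, this]

-- one no-key step: capC skips a head character no key starts at
theorem capC_cons (K : List Char) (c : Char) (t : List Char) (hK : K ≠ [])
    (h0 : ¬ K <+: (c :: t)) : capC K (c :: t) = capC K t := by
  have := capC_append_no K [c] t hK (by
    intro i hi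
    have hi0 : i = 0 := by simpa using hi
    subst hi0
    simpa using h0)
  simpa using this

-- all digits in a takeWhile run
theorem takeWhile_digits (l : List Char) : ∀ c ∈ l.takeWhile PySem.Chars.isdigit, PySem.Chars.isdigit c = true :=
  fun _ hc => List.mem_takeWhile_imp hc

-- later occurrence of the key in the tail part of an append wins
theorem capC_append_later (key pre rest' : List Char) (hkey : key ≠ []) (k : Nat)
    (h1 : PySem.Chars.rfind rest' key = (k : Int)) (h2 : key <+: rest'.drop k)
    (h3 : ∀ i, k < i → ¬ key <+: rest'.drop i) :
    capC key (pre ++ rest') = capC key rest' := by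
  have hdrop : ∀ i : Nat, pre.length ≤ i → (pre ++ rest').drop i = rest'.drop (i - pre.length) := by
    intro i hi
    rw [List.drop_append, List.drop_eq_nil_of_le hi, List.nil_append]
  have hA : PySem.Chars.rfind (pre ++ rest') key = ((pre.length + k : Nat) : Int) := by
    apply rfind_eq_of
    · rw [hdrop _ (by omega)]
      simpa using h2
    · intro i hi
      have hge : pre.length ≤ i := by omega
      rw [hdrop i hge]
      exact h3 _ (by omega)
  have hne : ¬ (((pre.length + k : Nat) : Int) = -1) := by omega
  have hne' : ¬ (((k : Nat) : Int) = -1) := by omega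
  rw [capC, capC, hA, h1, if_neg hne, if_neg hne', Int.toNat_natCast, Int.toNat_natCast]
  have hd2 := hdrop (pre.length + k + key.length) (by omega)
  have hidx : pre.length + k + key.length - pre.length = k + key.length := by omega
  rw [hd2, hidx]

-- one-step unfoldings of A's loop
theorem pvLoopA_nil (s n : Option String) : pvLoopA [] s n = [("serie", s), ("nf", n)] := by
  rw [pvLoopA]

theorem pvLoopA_serie (head : Char) (t : List Char) (s n : Option String)
    (h6 : (head::t).take 6 = "Serie:".toList) :
    pvLoopA (head::t) s n = pvLoopA (pvInner [] ((head::t).drop 6)).2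
      (some (String.ofList (PySem.Chars.strip (pvInner [] ((head::t).drop 6)).1))) n := by
  rw [pvLoopA]
  simp only [h6, dif_pos]

theorem pvLoopA_nf (head : Char) (t : List Char) (s n : Option String)
    (h6 : ¬ (head::t).take 6 = "Serie:".toList)
    (h3 : (head::t).take 3 = "NF:".toList) :
    pvLoopA (head::t) s n = pvLoopA (pvInner [] ((head::t).drop 3)).2 s
      (some (String.ofList (PySem.Chars.strip (pvInner [] ((head::t).drop 3)).1))) := by
  rw [pvLoopA]
  simp only [h6, h3, dif_neg, dif_pos, not_false_iff]

theorem pvLoopA_skip (head : Char) (t : List Char) (s n : Option String)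
    (h6 : ¬ (head::t).take 6 = "Serie:".toList)
    (h3 : ¬ (head::t).take 3 = "NF:".toList) :
    pvLoopA (head::t) s n = pvLoopA t s n := by
  rw [pvLoopA]
  simp only [h6, h3, dif_neg, not_false_iff]

theorem not_prefix_serie (head : Char) (t : List Char)
    (h6 : ¬ (head::t).take 6 = "Serie:".toList) : ¬ "Serie:".toList <+: (head :: t) := by
  intro hp
  have := (List.prefix_iff_eq_take.mp hp).symm
  rw [show ("Serie:".toList).length = 6 from by decide] at this
  exact h6 this

theorem not_prefix_nf (head : Char) (t : List Char)
    (h3 : ¬ (head::t).take 3 = "NF:".toList) : ¬ "NF:".toList <+: (head :: t) := by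
  intro hp
  have := (List.prefix_iff_eq_take.mp hp).symm
  rw [show ("NF:".toList).length = 3 from by decide] at this
  exact h3 this

-- MAIN INVARIANT: A's loop returns, for each keyword, B's capture of the remaining
-- suffix when the keyword still occurs there, else the value carried so far.
theorem loopA_eq (rest : List Char) (s n : Option String) :
    pvLoopA rest s n = [("serie", ov (capC "Serie:".toList rest) s), ("nf", ov (capC "NF:".toList rest) n)] := by
  induction rest, s, n using pvLoopA.induct with
  | case1 s n =>
    rw [pvLoopA_nil, capC_nil _ (by decide), capC_nil _ (by decide)]
    simp [ov]
  | case2 s n head t h6 p ih =>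
    rw [pvLoopA_serie head t s n h6]
    set tl := (head::t).drop 6 with htl0
    have hrest : head :: t = "Serie:".toList ++ tl := by
      conv_lhs => rw [← List.take_append_drop 6 (head :: t)]
      rw [h6]
    set d := tl.takeWhile PySem.Chars.isdigit with hdd
    set r' := tl.dropWhile PySem.Chars.isdigit with hrr
    have htl : tl = d ++ r' := (List.takeWhile_append_dropWhile (p := PySem.Chars.isdigit) (l := tl)).symm
    have hrest2 : head :: t = ("Serie:".toList ++ d) ++ r' := by
      rw [hrest, htl, List.append_assoc]
    have hdall : ∀ c ∈ d, PySem.Chars.isdigit c = true := takeWhile_digits tl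
    have hstrip : PySem.Chars.strip d = d := strip_digits d hdall
    have hinner : pvInner [] tl = (d, r') := by
      rw [pvInner_eq, List.nil_append, ← hdd, ← hrr]
    have hp : p = pvInner [] tl := rfl
    rw [hp, hinner] at ih
    rw [hinner]
    simp only at ih ⊢
    have hN : capC "NF:".toList (head::t) = capC "NF:".toList r' := by
      rw [hrest2]
      apply capC_append_no _ _ _ (by decide)
      intro i hi
      rcases Nat.eq_zero_or_pos i with rfl | hpos
      · rw [List.drop_zero]
        apply not_prefix_of_head? _ _ 'S' (by decide)
        · rw [show "Serie:".toList = 'S' :: "erie:".toList from by decide]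
          simp
        · decide
      · exact no_occ_in_pre _ d r' _ (Or.inr (by decide)) (by decide) hdall (by decide) i hpos hi
    rcases rfind_cases r' "Serie:".toList (by decide) with ⟨h1, h2⟩ | ⟨k, h1, h2, h3⟩
    · have hS : capC "Serie:".toList (head::t) = some d := by
        rw [hrest2]
        rw [capC_append_hit _ _ _ (by decide) (List.prefix_append _ _)
          (no_occ_in_pre _ d r' _ (Or.inl (by decide)) (by decide) hdall (by decide)) h2]
        rw [List.drop_left, ← htl, pvCapDigits_eq]
      have hSr' : capC "Serie:".toList r' = none := by rw [capC, if_pos h1]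
      rw [ih, hS, hSr', hN]
      simp [ov, hstrip]
    · have hS : capC "Serie:".toList (head::t) = capC "Serie:".toList r' := by
        rw [hrest2]
        exact capC_append_later _ _ _ (by decide) k h1 h2 h3
      have hne' : ¬ (((k : Nat) : Int) = -1) := by omega
      have hsome : capC "Serie:".toList r' =
          some (pvCapDigits (r'.drop (k + ("Serie:".toList).length))) := by
        rw [capC, h1, if_neg hne', Int.toNat_natCast]
      rw [ih, hS, hsome, hN]
      simp [ov]
  | case3 s n head t h6 h3 p ih =>
    rw [pvLoopA_nf head t s n h6 h3]
    set tl := (head::t).drop 3 with htl0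
    have hrest : head :: t = "NF:".toList ++ tl := by
      conv_lhs => rw [← List.take_append_drop 3 (head :: t)]
      rw [h3]
    set d := tl.takeWhile PySem.Chars.isdigit with hdd
    set r' := tl.dropWhile PySem.Chars.isdigit with hrr
    have htl : tl = d ++ r' := (List.takeWhile_append_dropWhile (p := PySem.Chars.isdigit) (l := tl)).symm
    have hrest2 : head :: t = ("NF:".toList ++ d) ++ r' := by
      rw [hrest, htl, List.append_assoc]
    have hdall : ∀ c ∈ d, PySem.Chars.isdigit c = true := takeWhile_digits tl
    have hstrip : PySem.Chars.strip d = d := strip_digits d hdall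
    have hinner : pvInner [] tl = (d, r') := by
      rw [pvInner_eq, List.nil_append, ← hdd, ← hrr]
    have hp : p = pvInner [] tl := rfl
    rw [hp, hinner] at ih
    rw [hinner]
    simp only at ih ⊢
    have hS : capC "Serie:".toList (head::t) = capC "Serie:".toList r' := by
      rw [hrest2]
      apply capC_append_no _ _ _ (by decide)
      intro i hi
      rcases Nat.eq_zero_or_pos i with rfl | hpos
      · rw [List.drop_zero, ← hrest2]
        exact not_prefix_serie head t h6
      · exact no_occ_in_pre _ d r' _ (Or.inl (by decide)) (by decide) hdall (by decide) i hpos hi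
    rcases rfind_cases r' "NF:".toList (by decide) with ⟨h1, h2⟩ | ⟨k, h1, h2, h3'⟩
    · have hN : capC "NF:".toList (head::t) = some d := by
        rw [hrest2]
        rw [capC_append_hit _ _ _ (by decide) (List.prefix_append _ _)
          (no_occ_in_pre _ d r' _ (Or.inr (by decide)) (by decide) hdall (by decide)) h2]
        rw [List.drop_left, ← htl, pvCapDigits_eq]
      have hNr' : capC "NF:".toList r' = none := by rw [capC, if_pos h1]
      rw [ih, hN, hNr', hS]
      simp [ov, hstrip]
    · have hN : capC "NF:".toList (head::t) = capC "NF:".toList r' := by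
        rw [hrest2]
        exact capC_append_later _ _ _ (by decide) k h1 h2 h3'
      have hne' : ¬ (((k : Nat) : Int) = -1) := by omega
      have hsome : capC "NF:".toList r' =
          some (pvCapDigits (r'.drop (k + ("NF:".toList).length))) := by
        rw [capC, h1, if_neg hne', Int.toNat_natCast]
      rw [ih, hN, hsome, hS]
      simp [ov]
  | case4 s n head t h6 h3 ih =>
    rw [pvLoopA_skip head t s n h6 h3, ih,
      capC_cons _ _ _ (by decide) (not_prefix_serie head t h6),
      capC_cons _ _ _ (by decide) (not_prefix_nf head t h3)]

theorem extrair_eq (texto : String) : extrair_serie_nf texto = extrair_serie_nf_alt texto := by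
  rw [extrair_serie_nf, extrair_serie_nf_alt, loopA_eq, pvCap_eq, pvCap_eq]
  cases capC "Serie:".toList texto.toList <;> cases capC "NF:".toList texto.toList <;> simp [ov]

-- ===== VERDICT (by name: the statement is the Claim_ definition above) =====
theorem extrair_serie_nf_spec : Claim_equal_extrair_serie_nf := by
  intro texto _
  unfold Spec_extrair_serie_nf
  exact extrair_eq texto
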